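-- pv_equiv track=rewrite | github.com/IKnowThatIKnowNothin/AtD-Bot | TP.py | check_chokepoints_in_path
-- ===== SOURCE A (Python) =====
-- def check_chokepoints_in_path(path):
--     notices = []
--
--     for i in range(len(path) - 1):
--         region_a = path[i]
--         region_b = path[i + 1]
--         pair = {region_a, region_b}
--
--         if pair == {"Riverlands", "Vale"}:
--             notices.append("Movement between the Riverlands and the Vale requires permission to pass through the Bloody Gate. Please ping the controller of the Bloody Gate (presumed House Arryn).")
--
--         if pair == {"Riverlands", "North"}:
--             notices.append("Movement between the Riverlands and the North requires permission to pass through Moat Cailin. Please ping the controller of Moat Cailin (presumed House Stark).")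
--
--         if pair == {"Riverlands", "Westerlands"}:
--             notices.append("Movement between the Riverlands and the Westerlands requires permission to pass through the Golden Tooth. Please ping House Lefford of the Golden Tooth.")
--
--         if pair == {"Stormlands", "Dorne"}:
--             notices.append("Movement between the Stormlands and Dorne is assumed to pass through the Boneway or the eastern Prince’s Pass. Both House Dondarrion and House Yronwood must be pinged for permission.")
--
--         if pair == {"Reach", "Dorne"}:
--             notices.append("Movement between the Reach and Dorne is assumed to pass through the western Prince’s Pass. Both House Caron and House Fowler must be pinged for permission.")
--
--     return notices
-- ===== SOURCE B (Python) =====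
-- _CHOKEPOINTS = [
--     ("Riverlands", "Vale", "Movement between the Riverlands and the Vale requires permission to pass through the Bloody Gate. Please ping the controller of the Bloody Gate (presumed House Arryn)."),
--     ("Riverlands", "North", "Movement between the Riverlands and the North requires permission to pass through Moat Cailin. Please ping the controller of Moat Cailin (presumed House Stark)."),
--     ("Riverlands", "Westerlands", "Movement between the Riverlands and the Westerlands requires permission to pass through the Golden Tooth. Please ping House Lefford of the Golden Tooth."),
--     ("Stormlands", "Dorne", "Movement between the Stormlands and Dorne is assumed to pass through the Boneway or the eastern Prince\u2019s Pass. Both House Dondarrion and House Yronwood must be pinged for permission."),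
--     ("Reach", "Dorne", "Movement between the Reach and Dorne is assumed to pass through the western Prince\u2019s Pass. Both House Caron and House Fowler must be pinged for permission."),
-- ]
--
--
-- def check_chokepoints_in_path(path):
--     # Staged passes: for each chokepoint, scan the whole path for that crossing
--     # (in either direction), recording the step index; then sort the hits by
--     # step index and emit the messages.  Distinct chokepoints never hit the
--     # same step, so this reproduces the path-order output.
--     hits = []
--     for x, y, msg in _CHOKEPOINTS:
--         for i in range(len(path) - 1):
--             a, b = path[i], path[i + 1]
--             if (a == x and b == y) or (a == y and b == x):
--                 hits.append((i, msg))
--     hits.sort(key=lambda t: t[0])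
--     return [msg for _, msg in hits]
-- ===== Notes on version B (the rewrite author's own statement) =====
-- stated objective: alternative
-- what changed: Replaces A's single pass that tests every adjacent pair against five branches by staged passes: one scan of the path per chokepoint collecting (step index, message) hits, then a stable sort of the hits by step index; correct because distinct chokepoints never match the same step.
import Mathlib
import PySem

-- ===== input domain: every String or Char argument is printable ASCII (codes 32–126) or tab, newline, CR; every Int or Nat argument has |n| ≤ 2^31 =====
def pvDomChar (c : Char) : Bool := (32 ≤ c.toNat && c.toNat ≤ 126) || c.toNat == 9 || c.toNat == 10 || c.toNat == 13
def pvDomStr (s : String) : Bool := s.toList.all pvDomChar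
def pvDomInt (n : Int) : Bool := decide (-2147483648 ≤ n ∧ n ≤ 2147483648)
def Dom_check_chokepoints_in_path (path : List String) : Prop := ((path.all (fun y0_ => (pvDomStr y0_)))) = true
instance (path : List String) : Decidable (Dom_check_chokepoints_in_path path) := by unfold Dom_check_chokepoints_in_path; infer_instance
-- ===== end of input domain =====

-- B replaces A's single pass (check every adjacent pair against five branches) by
-- staged passes: one scan of the path per chokepoint collecting (step, message)
-- hits, then a sort by step index (objective: alternative, not faster).

-- the five notice strings (shared literals; both Pythons contain them verbatim)
def msgRV : String := "Movement between the Riverlands and the Vale requires permission to pass through the Bloody Gate. Please ping the controller of the Bloody Gate (presumed House Arryn)."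
def msgRN : String := "Movement between the Riverlands and the North requires permission to pass through Moat Cailin. Please ping the controller of Moat Cailin (presumed House Stark)."
def msgRW : String := "Movement between the Riverlands and the Westerlands requires permission to pass through the Golden Tooth. Please ping House Lefford of the Golden Tooth."
def msgSD : String := "Movement between the Stormlands and Dorne is assumed to pass through the Boneway or the eastern Prince’s Pass. Both House Dondarrion and House Yronwood must be pinged for permission."
def msgRD : String := "Movement between the Reach and Dorne is assumed to pass through the western Prince’s Pass. Both House Caron and House Fowler must be pinged for permission."

-- ===== PORT A =====
def check_chokepoints_in_path (path : List String) : List String :=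
  (PySem.List.pyRange 0 ((path.length : Int) - 1) 1).foldl (fun notices i =>
    let region_a := PySem.List.pyGetD path i ""
    let region_b := PySem.List.pyGetD path (i + 1) ""
    let pair := PySem.Set.ofList [region_a, region_b]
    let notices := if PySem.Set.equal pair (PySem.Set.ofList ["Riverlands", "Vale"]) then notices ++ [msgRV] else notices
    let notices := if PySem.Set.equal pair (PySem.Set.ofList ["Riverlands", "North"]) then notices ++ [msgRN] else notices
    let notices := if PySem.Set.equal pair (PySem.Set.ofList ["Riverlands", "Westerlands"]) then notices ++ [msgRW] else notices
    let notices := if PySem.Set.equal pair (PySem.Set.ofList ["Stormlands", "Dorne"]) then notices ++ [msgSD] else notices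
    let notices := if PySem.Set.equal pair (PySem.Set.ofList ["Reach", "Dorne"]) then notices ++ [msgRD] else notices
    notices) []

-- ===== PORT B =====
-- the module-level list of chokepoints: (region x, region y, message)
def chokeList : List (String × String × String) :=
  [ ("Riverlands", "Vale", msgRV),
    ("Riverlands", "North", msgRN),
    ("Riverlands", "Westerlands", msgRW),
    ("Stormlands", "Dorne", msgSD),
    ("Reach", "Dorne", msgRD) ]

def check_chokepoints_in_path_alt (path : List String) : List String :=
  -- staged passes: one scan per chokepoint, collecting (step index, message)
  let hits := chokeList.foldl (fun hits e =>
    (PySem.List.pyRange 0 ((path.length : Int) - 1) 1).foldl (fun hits i =>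
      let a := PySem.List.pyGetD path i ""
      let b := PySem.List.pyGetD path (i + 1) ""
      if (a == e.1 && b == e.2.1) || (a == e.2.1 && b == e.1) then hits ++ [(i, e.2.2)] else hits) hits) []
  -- hits.sort(key=lambda t: t[0]); [msg for _, msg in hits]
  (PySem.List.sorted hits (fun t => t.1) false).map (fun t => t.2)

-- ===== PRECONDITION & SPEC =====
def Spec_check_chokepoints_in_path (path : List String) (out : List String) : Prop := out = check_chokepoints_in_path_alt path
instance (path : List String) (out : List String) : Decidable (Spec_check_chokepoints_in_path path out) := by unfold Spec_check_chokepoints_in_path; infer_instance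

-- ===== CLAIM (what is proved, stated in full; the proofs are below) =====
def Claim_equal_check_chokepoints_in_path : Prop := ∀ (path : List String), Dom_check_chokepoints_in_path path → Spec_check_chokepoints_in_path path (check_chokepoints_in_path path)

-- ===== LEMMAS AND PROOFS =====

-- B's boolean test for one chokepoint (x, y) against the adjacent pair (a, b)
def bcond (x y a b : String) : Bool := (a == x && b == y) || (a == y && b == x)

-- A's per-step appendage, with the set-equality tests
def hits (a b : String) : List String :=
  (if PySem.Set.equal (PySem.Set.ofList [a, b]) (PySem.Set.ofList ["Riverlands", "Vale"]) then [msgRV] else []) ++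
  (if PySem.Set.equal (PySem.Set.ofList [a, b]) (PySem.Set.ofList ["Riverlands", "North"]) then [msgRN] else []) ++
  (if PySem.Set.equal (PySem.Set.ofList [a, b]) (PySem.Set.ofList ["Riverlands", "Westerlands"]) then [msgRW] else []) ++
  (if PySem.Set.equal (PySem.Set.ofList [a, b]) (PySem.Set.ofList ["Stormlands", "Dorne"]) then [msgSD] else []) ++
  (if PySem.Set.equal (PySem.Set.ofList [a, b]) (PySem.Set.ofList ["Reach", "Dorne"]) then [msgRD] else [])

-- the same appendage phrased with B's boolean tests
def bhits (a b : String) : List String :=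
  (if bcond "Riverlands" "Vale" a b then [msgRV] else []) ++
  (if bcond "Riverlands" "North" a b then [msgRN] else []) ++
  (if bcond "Riverlands" "Westerlands" a b then [msgRW] else []) ++
  (if bcond "Stormlands" "Dorne" a b then [msgSD] else []) ++
  (if bcond "Reach" "Dorne" a b then [msgRD] else [])

-- {a,b} == {x,y} (frozenset equality) is the two-orientation equality test, for x ≠ y
theorem set_pair_equal (a b x y : String) (hxy : x ≠ y) :
    PySem.Set.equal (PySem.Set.ofList [a, b]) (PySem.Set.ofList [x, y])
      = bcond x y a b := by
  unfold bcond
  rw [Bool.eq_iff_iff]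
  simp only [PySem.Set.equal_iff, PySem.Set.mem_ofList, List.mem_cons,
    Bool.or_eq_true, Bool.and_eq_true, beq_iff_eq]
  constructor
  · intro h
    have ha := (h a).mp (Or.inl rfl)
    have hb := (h b).mp (by simp)
    have hx := (h x).mpr (Or.inl rfl)
    have hy := (h y).mpr (by simp)
    rcases ha with h1 | h1 <;> rcases hb with h2 | h2 <;> simp_all
  · rintro (⟨rfl, rfl⟩ | ⟨rfl, rfl⟩) <;> intro z <;> tauto

theorem hits_eq_bhits (a b : String) : hits a b = bhits a b := by
  unfold hits bhits
  rw [set_pair_equal a b _ _ (by decide), set_pair_equal a b _ _ (by decide),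
    set_pair_equal a b _ _ (by decide), set_pair_equal a b _ _ (by decide),
    set_pair_equal a b _ _ (by decide)]

-- at most one chokepoint matches a given adjacent pair
theorem bhits_len_le_one (a b : String) : (bhits a b).length ≤ 1 := by
  by_cases c1 : bcond "Riverlands" "Vale" a b = true
  · rcases (by simpa [bcond] using c1 : (a = "Riverlands" ∧ b = "Vale") ∨ (a = "Vale" ∧ b = "Riverlands")) with ⟨rfl, rfl⟩ | ⟨rfl, rfl⟩ <;> decide
  · by_cases c2 : bcond "Riverlands" "North" a b = true
    · rcases (by simpa [bcond] using c2 : (a = "Riverlands" ∧ b = "North") ∨ (a = "North" ∧ b = "Riverlands")) with ⟨rfl, rfl⟩ | ⟨rfl, rfl⟩ <;> decide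
    · by_cases c3 : bcond "Riverlands" "Westerlands" a b = true
      · rcases (by simpa [bcond] using c3 : (a = "Riverlands" ∧ b = "Westerlands") ∨ (a = "Westerlands" ∧ b = "Riverlands")) with ⟨rfl, rfl⟩ | ⟨rfl, rfl⟩ <;> decide
      · by_cases c4 : bcond "Stormlands" "Dorne" a b = true
        · rcases (by simpa [bcond] using c4 : (a = "Stormlands" ∧ b = "Dorne") ∨ (a = "Dorne" ∧ b = "Stormlands")) with ⟨rfl, rfl⟩ | ⟨rfl, rfl⟩ <;> decide
        · simp only [Bool.not_eq_true] at c1 c2 c3 c4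
          simp [bhits, c1, c2, c3, c4]
          split_ifs <;> simp

-- A's foldl over conditional appends is the flatMap of its per-step appendage
theorem foldA_flatMap (l : List Int) (path : List String) (init : List String) :
    l.foldl (fun notices i =>
      let region_a := PySem.List.pyGetD path i ""
      let region_b := PySem.List.pyGetD path (i + 1) ""
      let pair := PySem.Set.ofList [region_a, region_b]
      let notices := if PySem.Set.equal pair (PySem.Set.ofList ["Riverlands", "Vale"]) then notices ++ [msgRV] else notices
      let notices := if PySem.Set.equal pair (PySem.Set.ofList ["Riverlands", "North"]) then notices ++ [msgRN] else notices
      let notices := if PySem.Set.equal pair (PySem.Set.ofList ["Riverlands", "Westerlands"]) then notices ++ [msgRW] else notices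
      let notices := if PySem.Set.equal pair (PySem.Set.ofList ["Stormlands", "Dorne"]) then notices ++ [msgSD] else notices
      let notices := if PySem.Set.equal pair (PySem.Set.ofList ["Reach", "Dorne"]) then notices ++ [msgRD] else notices
      notices) init
    = init ++ l.flatMap (fun i => hits (PySem.List.pyGetD path i "") (PySem.List.pyGetD path (i + 1) "")) := by
  induction l generalizing init with
  | nil => simp
  | cons x xs ih =>
    rw [List.foldl_cons, List.flatMap_cons, ih]
    simp only [hits]
    split_ifs <;> simp

-- one staged pass (the inner loop of B) as a flatMap
theorem foldInner (e : String × String × String) (l : List Int)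
    (path : List String) (init : List (Int × String)) :
    l.foldl (fun hits i =>
      let a := PySem.List.pyGetD path i ""
      let b := PySem.List.pyGetD path (i + 1) ""
      if (a == e.1 && b == e.2.1) || (a == e.2.1 && b == e.1) then hits ++ [(i, e.2.2)] else hits) init
    = init ++ l.flatMap (fun i =>
        if bcond e.1 e.2.1 (PySem.List.pyGetD path i "") (PySem.List.pyGetD path (i + 1) "") then [(i, e.2.2)] else []) := by
  induction l generalizing init with
  | nil => simp
  | cons i is ihl =>
    rw [List.foldl_cons, List.flatMap_cons, ihl]
    simp only [bcond]
    split_ifs <;> simp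

-- B's nested foldl is the flatMap over chokepoints of the per-chokepoint filtered scan
theorem foldB_flatMap (ch : List (String × String × String)) (l : List Int)
    (path : List String) (init : List (Int × String)) :
    ch.foldl (fun hits e =>
      l.foldl (fun hits i =>
        let a := PySem.List.pyGetD path i ""
        let b := PySem.List.pyGetD path (i + 1) ""
        if (a == e.1 && b == e.2.1) || (a == e.2.1 && b == e.1) then hits ++ [(i, e.2.2)] else hits) hits) init
    = init ++ ch.flatMap (fun e => l.flatMap (fun i =>
        if bcond e.1 e.2.1 (PySem.List.pyGetD path i "") (PySem.List.pyGetD path (i + 1) "") then [(i, e.2.2)] else [])) := by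
  induction ch generalizing init with
  | nil => simp
  | cons e es ih =>
    rw [List.foldl_cons, foldInner, ih, List.flatMap_cons, List.append_assoc]

-- swapping the two flatMap loops is a permutation
theorem flatMap_append_perm {α γ : Type} (l : List α) (g h : α → List γ) :
    (l.flatMap (fun a => g a ++ h a)).Perm (l.flatMap g ++ l.flatMap h) := by
  induction l with
  | nil => simp
  | cons a l ih =>
    simp only [List.flatMap_cons, List.append_assoc]
    exact List.Perm.append_left _ ((ih.append_left _).trans (List.perm_append_comm_assoc _ _ _))

theorem flatMap_swap_perm {α β γ : Type} (l1 : List α) (l2 : List β) (f : α → β → List γ) :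
    (l1.flatMap fun a => l2.flatMap fun b => f a b).Perm
      (l2.flatMap fun b => l1.flatMap fun a => f a b) := by
  induction l1 with
  | nil => simp
  | cons a l1 ih =>
    simp only [List.flatMap_cons]
    exact (ih.append_left _).trans (flatMap_append_perm l2 (f a) _).symm

-- flatMap over strictly increasing keys, each block keyed constantly and of length ≤ 1,
-- is strictly increasing in the key
theorem flatMap_pairwise_lt (l : List Int) (hl : l.Pairwise (· < ·))
    (g : Int → List (Int × String))
    (hk : ∀ i p, p ∈ g i → p.1 = i) (hs : ∀ i, (g i).length ≤ 1) :
    (l.flatMap g).Pairwise (fun p q => p.1 < q.1) := by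
  induction l with
  | nil => simp
  | cons i l ih =>
    rw [List.flatMap_cons, List.pairwise_append]
    refine ⟨?_, ih hl.of_cons, ?_⟩
    · match hgi : g i with
      | [] => simp
      | [x] => simp
      | x :: y :: t => exact absurd (hs i) (by rw [hgi]; simp)
    · intro p hp q hq
      rw [hk i p hp]
      rw [List.mem_flatMap] at hq
      obtain ⟨j, hj, hqj⟩ := hq
      rw [hk j q hqj]
      exact (List.pairwise_cons.mp hl).1 j hj

-- per step, B's matched chokepoint entries are A's messages tagged with the step index
theorem hitAt_eq_map (i : Int) (a b : String) :
    chokeList.flatMap (fun e => if bcond e.1 e.2.1 a b then [(i, e.2.2)] else [])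
      = (bhits a b).map (fun m => (i, m)) := by
  simp only [chokeList, bhits, List.flatMap_cons, List.flatMap_nil, List.append_nil]
  split_ifs <;> simp

-- ===== VERDICT (by name: the statement is the Claim_ definition above) =====
theorem check_chokepoints_in_path_spec : Claim_equal_check_chokepoints_in_path := by
  intro path _
  unfold Spec_check_chokepoints_in_path check_chokepoints_in_path check_chokepoints_in_path_alt
  rw [foldA_flatMap, foldB_flatMap, List.nil_append, List.nil_append]
  set r := PySem.List.pyRange 0 ((path.length : Int) - 1) 1 with hr
  set g : Int → List (Int × String) := fun i =>
    (bhits (PySem.List.pyGetD path i "") (PySem.List.pyGetD path (i + 1) "")).map (fun m => (i, m)) with hg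
  have hperm : (r.flatMap g).Perm
      (chokeList.flatMap (fun e => r.flatMap (fun i =>
        if bcond e.1 e.2.1 (PySem.List.pyGetD path i "") (PySem.List.pyGetD path (i + 1) "") then [(i, e.2.2)] else []))) := by
    refine List.Perm.trans ?_ (flatMap_swap_perm r chokeList
      (fun i e => if bcond e.1 e.2.1 (PySem.List.pyGetD path i "") (PySem.List.pyGetD path (i + 1) "") then [(i, e.2.2)] else []))
    apply List.Perm.of_eq
    refine List.flatMap_congr ?_
    intro i _
    exact (hitAt_eq_map i _ _).symm
  have hpw : (r.flatMap g).Pairwise (fun p q => p.1 < q.1) := by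
    refine flatMap_pairwise_lt r (PySem.List.pairwise_lt_pyRange_one 0 ((path.length : Int) - 1)) g ?_ ?_
    · intro i p hp
      simp only [hg, List.mem_map] at hp
      obtain ⟨m, _, rfl⟩ := hp
      rfl
    · intro i
      simp only [hg, List.length_map]
      exact bhits_len_le_one _ _
  show List.flatMap (fun i => hits (PySem.List.pyGetD path i "") (PySem.List.pyGetD path (i + 1) "")) r
      = List.map (fun t => t.2) (PySem.List.sorted (List.flatMap (fun e => List.flatMap (fun i =>
          if bcond e.1 e.2.1 (PySem.List.pyGetD path i "") (PySem.List.pyGetD path (i + 1) "") then [(i, e.2.2)] else []) r) chokeList) (fun t => t.1))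
  have hsorted : PySem.List.sorted (List.flatMap (fun e => List.flatMap (fun i =>
          if bcond e.1 e.2.1 (PySem.List.pyGetD path i "") (PySem.List.pyGetD path (i + 1) "") then [(i, e.2.2)] else []) r) chokeList) (fun t => t.1)
      = List.flatMap g r := PySem.List.sorted_eq_of_perm_of_pairwise_lt _ _ _ hperm hpw
  rw [hsorted]
  simp only [List.map_flatMap, hg, List.map_map]
  refine List.flatMap_congr ?_
  intro i _
  rw [hits_eq_bhits]
  simp
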